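-- pv_equiv track=rewrite | github.com/ThierryCols/wololo | greedy.py | getSmallerShape
-- ===== SOURCE A (Python) =====
-- def getSmallerShape(x, y, shape, pizza):
-- 	h, w = shape
-- 	compteurDeJambon = 0
-- 	for i in range(x, x+h):
-- 		for j in range(y, y+w):
-- 			if pizza[i][j]=="H":
-- 				compteurDeJambon += 1
-- 				if compteurDeJambon > 2:
-- 					return (i+1-x,w)
-- 	compteurDeJambon = 0
-- 	for j in range(y, y+w):
-- 		for i in range(x, x+h):
-- 			if pizza[i][j]=="H":
-- 				compteurDeJambon += 1
-- 				if compteurDeJambon > 2: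
-- 					return (h,j+1-w)
-- 	return (h,w)
-- ===== SOURCE B (Python) =====
-- def getSmallerShape(x, y, shape, pizza):
--     h, w = shape
--     rows = range(x, x + h)
--     cols = range(y, y + w)
--     # per-row ham counts over the sub-rectangle, built in one pass
--     row_counts = [sum(1 for j in cols if pizza[i][j] == "H") for i in rows]
--     # the third ham (if any) is met during the row-major scan, so A's
--     # column-wise second pass can never trigger: it counts the same cells
--     total = 0
--     for idx, c in enumerate(row_counts):
--         total += c
--         if total >= 3:
--             return (idx + 1, w)
--     return (h, w)
-- ===== Notes on version B (the rewrite author's own statement) =====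
-- stated objective: simpler
-- what changed: B builds a per-row ham-count table over the sub-rectangle and scans its prefix sums for the first row reaching 3 hams, replacing A's fused early-exit cell scan and omitting A's provably dead second (column-wise) pass, which counts the same cells and so can never fire.
-- outside the precondition, e.g. on getSmallerShape(0, 0, (2, 3), [['H', 'H', 'H']]): A returns (1, 3), B raises IndexError
import Mathlib
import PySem

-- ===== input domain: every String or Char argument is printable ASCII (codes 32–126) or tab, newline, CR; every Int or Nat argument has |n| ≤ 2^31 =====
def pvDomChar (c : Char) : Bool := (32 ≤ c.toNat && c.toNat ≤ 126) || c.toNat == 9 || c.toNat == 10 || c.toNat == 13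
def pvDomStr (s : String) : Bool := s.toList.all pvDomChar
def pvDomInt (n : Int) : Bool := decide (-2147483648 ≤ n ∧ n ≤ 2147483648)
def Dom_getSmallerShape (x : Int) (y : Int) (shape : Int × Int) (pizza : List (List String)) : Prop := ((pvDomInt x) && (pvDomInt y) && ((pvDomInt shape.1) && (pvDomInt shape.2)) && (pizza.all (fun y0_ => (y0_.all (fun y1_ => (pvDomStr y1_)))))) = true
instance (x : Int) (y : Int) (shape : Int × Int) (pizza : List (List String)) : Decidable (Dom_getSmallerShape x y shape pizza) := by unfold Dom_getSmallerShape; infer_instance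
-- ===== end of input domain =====

-- B builds a per-row ham-count table and scans its prefix sums instead of A's fused
-- early-exit cell scan, and drops A's provably dead column-wise second pass (simpler).


-- ===== PORT A =====
-- pizza[i][j] == "H", totalised with defaults (Pre_ guarantees the indices are in range)
def pvHam (pizza : List (List String)) (i j : Int) : Bool :=
  PySem.List.pyGetD (PySem.List.pyGetD pizza i []) j "" == "H"

-- inner j-loop of A's first pass; carries the counter, returns early via Sum.inl
def pvScanRow (pizza : List (List String)) (x w i : Int) : List Int → Int → Sum (Int × Int) Int
  | [], c => Sum.inr c
  | j :: js, c =>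
    if pvHam pizza i j then
      if c + 1 > 2 then Sum.inl (i + 1 - x, w)
      else pvScanRow pizza x w i js (c + 1)
    else pvScanRow pizza x w i js c

-- outer i-loop of A's first pass
def pvScanRows (pizza : List (List String)) (x w : Int) (js : List Int) : List Int → Int → Option (Int × Int)
  | [], _ => none
  | i :: is, c =>
    match pvScanRow pizza x w i js c with
    | Sum.inl r => some r
    | Sum.inr c' => pvScanRows pizza x w js is c'

-- inner i-loop of A's second pass
def pvScanCol (pizza : List (List String)) (h w j : Int) : List Int → Int → Sum (Int × Int) Int
  | [], c => Sum.inr c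
  | i :: is, c =>
    if pvHam pizza i j then
      if c + 1 > 2 then Sum.inl (h, j + 1 - w)
      else pvScanCol pizza h w j is (c + 1)
    else pvScanCol pizza h w j is c

-- outer j-loop of A's second pass
def pvScanCols (pizza : List (List String)) (h w : Int) (is : List Int) : List Int → Int → Option (Int × Int)
  | [], _ => none
  | j :: js, c =>
    match pvScanCol pizza h w j is c with
    | Sum.inl r => some r
    | Sum.inr c' => pvScanCols pizza h w is js c'

def getSmallerShape (x : Int) (y : Int) (shape : Int × Int) (pizza : List (List String)) : Int × Int :=
  let h := shape.1
  let w := shape.2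
  let is := PySem.List.pyRange x (x + h) 1
  let js := PySem.List.pyRange y (y + w) 1
  match pvScanRows pizza x w js is 0 with
  | some r => r
  | none =>
    match pvScanCols pizza h w is js 0 with
    | some r => r
    | none => (h, w)

-- ===== PORT B =====
-- sum(1 for j in cols if pizza[i][j] == "H")
def pvRowCount (pizza : List (List String)) (js : List Int) (i : Int) : Int :=
  (js.countP (pvHam pizza i) : Int)

-- the enumerate loop over row_counts, tracking idx and the running total
def pvAltScan (w h : Int) : List Int → Int → Int → Int × Int
  | [], _, _ => (h, w)
  | c :: cs, idx, total =>
    if total + c ≥ 3 then (idx + 1, w)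
    else pvAltScan w h cs (idx + 1) (total + c)

def getSmallerShape_alt (x : Int) (y : Int) (shape : Int × Int) (pizza : List (List String)) : Int × Int :=
  let h := shape.1
  let w := shape.2
  let rows := PySem.List.pyRange x (x + h) 1
  let cols := PySem.List.pyRange y (y + w) 1
  let rowCounts := rows.map (pvRowCount pizza cols)
  pvAltScan w h rowCounts 0 0

-- ===== PRECONDITION & SPEC =====
-- Pre_ excludes the inputs on which Python A raises IndexError (a cell of the sub-rectangle is
-- out of range); this also excludes the rare inputs where A returns its third ham strictly
-- before touching such a cell (A returns there, B raises — see the cite in claim.json).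
def Pre_getSmallerShape (x : Int) (y : Int) (shape : Int × Int) (pizza : List (List String)) : Prop :=
  shape.1 ≤ 0 ∨ shape.2 ≤ 0 ∨
    ((-(pizza.length : Int) ≤ x ∧ x + shape.1 ≤ (pizza.length : Int)) ∧
      ∀ p ∈ PySem.List.enumerate pizza 0,
        ((x ≤ p.1 ∧ p.1 < x + shape.1) ∨
         (x ≤ p.1 - (pizza.length : Int) ∧ p.1 - (pizza.length : Int) < x + shape.1)) →
        (-(p.2.length : Int) ≤ y ∧ y + shape.2 ≤ (p.2.length : Int)))

instance (x : Int) (y : Int) (shape : Int × Int) (pizza : List (List String)) : Decidable (Pre_getSmallerShape x y shape pizza) := by unfold Pre_getSmallerShape; infer_instance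

def pvWitness_getSmallerShape : Int × Int × (Int × Int) × List (List String) :=
  (0, 0, (1, 1), [["H"]])

def Spec_getSmallerShape (x : Int) (y : Int) (shape : Int × Int) (pizza : List (List String)) (out : Int × Int) : Prop := out = getSmallerShape_alt x y shape pizza
instance (x : Int) (y : Int) (shape : Int × Int) (pizza : List (List String)) (out : Int × Int) : Decidable (Spec_getSmallerShape x y shape pizza out) := by unfold Spec_getSmallerShape; infer_instance

-- ===== CLAIM (what is proved, stated in full; the proofs are below) =====
def Claim_equal_getSmallerShape : Prop := ∀ (x : Int) (y : Int) (shape : Int × Int) (pizza : List (List String)), Dom_getSmallerShape x y shape pizza → Pre_getSmallerShape x y shape pizza → Spec_getSmallerShape x y shape pizza (getSmallerShape x y shape pizza)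

-- ===== LEMMAS AND PROOFS =====

-- A's inner row loop, characterised: it returns early iff the counter would reach 3 on this row
theorem pvScanRow_eq (pizza : List (List String)) (x w i : Int) (js : List Int) (c : Int)
    (hc : c ≤ 2) :
    pvScanRow pizza x w i js c =
      if 3 ≤ c + (js.countP (pvHam pizza i) : Int) then Sum.inl (i + 1 - x, w)
      else Sum.inr (c + (js.countP (pvHam pizza i) : Int)) := by
  induction js generalizing c with
  | nil => simp [pvScanRow]; omega
  | cons j js ih =>
    by_cases hj : pvHam pizza i j
    · rw [pvScanRow, if_pos hj]
      rw [List.countP_cons, if_pos hj]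
      by_cases h2 : c + 1 > 2
      · rw [if_pos h2]
        have : 3 ≤ c + ((js.countP (pvHam pizza i) + 1 : Nat) : Int) := by
          have : (0:Int) ≤ (js.countP (pvHam pizza i) : Int) := Int.natCast_nonneg _
          push_cast; omega
        rw [if_pos this]
      · rw [if_neg h2, ih (c + 1) (by omega)]
        push_cast
        by_cases h3 : 3 ≤ c + 1 + (js.countP (pvHam pizza i) : Int)
        · rw [if_pos h3, if_pos (by omega)]
        · rw [if_neg h3, if_neg (by omega)]
          congr 1
          omega
    · rw [pvScanRow, if_neg hj, List.countP_cons, if_neg hj, ih c hc]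
      norm_num

-- A's inner column loop, characterised the same way
theorem pvScanCol_eq (pizza : List (List String)) (h w j : Int) (is : List Int) (c : Int)
    (hc : c ≤ 2) :
    pvScanCol pizza h w j is c =
      if 3 ≤ c + (is.countP (fun i => pvHam pizza i j) : Int) then Sum.inl (h, j + 1 - w)
      else Sum.inr (c + (is.countP (fun i => pvHam pizza i j) : Int)) := by
  induction is generalizing c with
  | nil => simp [pvScanCol]; omega
  | cons i is ih =>
    by_cases hi : pvHam pizza i j
    · rw [pvScanCol, if_pos hi, List.countP_cons, if_pos hi]
      by_cases h2 : c + 1 > 2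
      · rw [if_pos h2]
        have : 3 ≤ c + ((is.countP (fun i => pvHam pizza i j) + 1 : Nat) : Int) := by
          have : (0:Int) ≤ (is.countP (fun i => pvHam pizza i j) : Int) := Int.natCast_nonneg _
          push_cast; omega
        rw [if_pos this]
      · rw [if_neg h2, ih (c + 1) (by omega)]
        push_cast
        by_cases h3 : 3 ≤ c + 1 + (is.countP (fun i => pvHam pizza i j) : Int)
        · rw [if_pos h3, if_pos (by omega)]
        · rw [if_neg h3, if_neg (by omega)]
          congr 1
          omega
    · rw [pvScanCol, if_neg hi, List.countP_cons, if_neg hi, ih c hc]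
      norm_num

-- A's second pass can never fire when at most 2 hams are in the rectangle
theorem pvScanCols_none (pizza : List (List String)) (h w : Int) (is : List Int)
    (js : List Int) (c : Int) (hc : 0 ≤ c)
    (hb : c + ((js.map (fun j => (is.countP (fun i => pvHam pizza i j) : Int))).sum) ≤ 2) :
    pvScanCols pizza h w is js c = none := by
  induction js generalizing c with
  | nil => rfl
  | cons j js ih =>
    have hnn : ∀ z ∈ js.map (fun j => (is.countP (fun i => pvHam pizza i j) : Int)), 0 ≤ z := by
      intro z hz
      simp only [List.mem_map] at hz
      obtain ⟨j', _, rfl⟩ := hz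
      exact Int.natCast_nonneg _
    have hsum : 0 ≤ (js.map (fun j => (is.countP (fun i => pvHam pizza i j) : Int))).sum :=
      List.sum_nonneg hnn
    simp only [List.map_cons, List.sum_cons] at hb
    have hcnt : (0:Int) ≤ (is.countP (fun i => pvHam pizza i j) : Int) := Int.natCast_nonneg _
    rw [pvScanCols, pvScanCol_eq pizza h w j is c (by omega), if_neg (by omega)]
    exact ih (c + (is.countP (fun i => pvHam pizza i j) : Int)) (by omega) (by omega)

-- first pass vs B's table-scan, with the leftover-count bound when no early return happens
theorem pvScanRows_eq (pizza : List (List String)) (x w h : Int) (js : List Int) :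
    ∀ (n : Nat) (idx c : Int), 0 ≤ c → c ≤ 2 →
      ((match pvScanRows pizza x w js (PySem.List.pyRange (x + idx) (x + idx + n) 1) c with
        | some r => r
        | none => (h, w))
        = pvAltScan w h ((PySem.List.pyRange (x + idx) (x + idx + n) 1).map (pvRowCount pizza js)) idx c)
      ∧ (pvScanRows pizza x w js (PySem.List.pyRange (x + idx) (x + idx + n) 1) c = none →
          c + (((PySem.List.pyRange (x + idx) (x + idx + n) 1).map (pvRowCount pizza js)).sum) ≤ 2) := by
  intro n
  induction n with
  | zero =>
    intro idx c hc0 hc2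
    rw [PySem.List.pyRange_one_eq_nil (by omega)]
    exact ⟨rfl, fun _ => by simpa using hc2⟩
  | succ n ih =>
    intro idx c hc0 hc2
    have e0 : x + idx + ((n + 1 : Nat) : Int) = x + (idx + 1) + (n : Int) := by push_cast; ring
    have hcons : PySem.List.pyRange (x + idx) (x + idx + ((n + 1 : Nat) : Int)) 1
        = (x + idx) :: PySem.List.pyRange (x + (idx + 1)) (x + (idx + 1) + (n : Int)) 1 := by
      rw [PySem.List.pyRange_one_cons (by push_cast; omega)]
      rw [show x + idx + 1 = x + (idx + 1) by ring, e0]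
    have hcnt : (0:Int) ≤ (js.countP (pvHam pizza (x + idx)) : Int) := Int.natCast_nonneg _
    rw [hcons]
    rw [pvScanRows, pvScanRow_eq pizza x w (x + idx) js c hc2]
    by_cases h3 : 3 ≤ c + (js.countP (pvHam pizza (x + idx)) : Int)
    · rw [if_pos h3]
      constructor
      · simp only [List.map_cons, pvAltScan, pvRowCount]
        rw [if_pos (by omega)]
        rw [show x + idx + 1 - x = idx + 1 by ring]
      · intro hnone; cases hnone
    · rw [if_neg h3]
      have hkey := ih (idx + 1) (c + (js.countP (pvHam pizza (x + idx)) : Int)) (by omega) (by omega)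
      constructor
      · simp only [List.map_cons, pvAltScan, pvRowCount]
        rw [if_neg (by omega)]
        exact hkey.1
      · intro hnone
        have := hkey.2 hnone
        simp only [List.map_cons, List.sum_cons, pvRowCount]
        omega

-- a 0/1 ite-sum is countP (over Int)
theorem pv_sum_ite (p : Int → Bool) (l : List Int) :
    (l.map (fun a => if p a then (1:Int) else 0)).sum = (l.countP p : Int) := by
  induction l with
  | nil => simp
  | cons a l ih =>
    rw [List.map_cons, List.sum_cons, ih, List.countP_cons]
    by_cases ha : p a
    · rw [if_pos ha, if_pos ha]; push_cast; ring
    · rw [if_neg ha, if_neg ha]; simp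

-- pointwise sums distribute over list sum (over Int)
theorem pv_sum_map_add (f g : Int → Int) (l : List Int) :
    (l.map (fun a => f a + g a)).sum = (l.map f).sum + (l.map g).sum := by
  induction l with
  | nil => simp
  | cons a l ih => simp only [List.map_cons, List.sum_cons, ih]; ring

-- double-counting: row totals and column totals of the rectangle agree
theorem pv_exchange (p : Int → Int → Bool) (is js : List Int) :
    ((is.map (fun i => (js.countP (p i) : Int))).sum)
      = ((js.map (fun j => (is.countP (fun i => p i j) : Int))).sum) := by
  induction is with
  | nil => simp
  | cons i is ih =>
    simp only [List.map_cons, List.sum_cons, ih]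
    have hsplit : (js.map (fun j => ((i :: is).countP (fun i' => p i' j) : Int))).sum
        = (js.map (fun j => (fun j => if p i j then (1:Int) else 0) j
            + (fun j => (is.countP (fun i' => p i' j) : Int)) j)).sum := by
      congr 1
      apply List.map_congr_left
      intro j _
      cases hp : p i j
      · simp [hp]
      · simp [hp]; omega
    rw [hsplit, pv_sum_map_add (fun j => if p i j then (1:Int) else 0)
          (fun j => (is.countP (fun i' => p i' j) : Int)) js, pv_sum_ite]

-- ===== VERDICT (by name: the statement is the Claim_ definition above) =====
theorem getSmallerShape_spec : Claim_equal_getSmallerShape := by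
  intro x y shape pizza _ _
  show getSmallerShape x y shape pizza = getSmallerShape_alt x y shape pizza
  simp only [getSmallerShape, getSmallerShape_alt]
  set h := shape.1 with hh
  set w := shape.2 with hw
  set js := PySem.List.pyRange y (y + w) 1 with hjs
  by_cases hpos : 0 ≤ h
  · have hx0 : x + h = x + 0 + ((h.toNat : Int)) := by omega
    rw [hx0]
    rw [show PySem.List.pyRange x (x + 0 + ((h.toNat : Int))) 1
          = PySem.List.pyRange (x + 0) (x + 0 + ((h.toNat : Int))) 1
        from by rw [show x + (0:Int) = x by ring]]
    obtain ⟨heq, hnone⟩ := pvScanRows_eq pizza x w h js h.toNat 0 0 (by omega) (by omega)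
    set R := PySem.List.pyRange (x + 0) (x + 0 + ((h.toNat : Int))) 1 with hR
    cases hres : pvScanRows pizza x w js R 0 with
    | some r =>
      rw [hres] at heq
      simpa using heq
    | none =>
      rw [hres] at heq hnone
      have hbound := hnone rfl
      have hrw : R.map (pvRowCount pizza js)
          = R.map (fun i => ((js.countP (pvHam pizza i) : Nat) : Int)) :=
        List.map_congr_left (fun i _ => rfl)
      rw [hrw] at hbound
      have hcols : pvScanCols pizza h w R js 0 = none := by
        apply pvScanCols_none pizza h w R js 0 le_rfl
        rw [← pv_exchange (pvHam pizza) R js]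
        omega
      rw [hcols]
      simpa using heq
  · have hnil : PySem.List.pyRange x (x + h) 1 = [] :=
      PySem.List.pyRange_one_eq_nil (by omega)
    rw [hnil]
    have hcols : pvScanCols pizza h w [] js 0 = none := by
      apply pvScanCols_none pizza h w [] js 0 le_rfl
      simp [List.countP_nil]
    rw [show pvScanRows pizza x w js [] 0 = none from rfl, hcols]
    simp [pvAltScan]
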